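-- pv_equiv track=rewrite | github.com/NataliaGiraldoA/miniproyecto | flask/FLASK-1/asteriskPyramid/asterisk_pyramid.py | asterisk_pyramid
-- ===== SOURCE A (Python) =====
-- def asterisk_pyramid(limit) -> str:
--     result = []
--
--     for i in range(1, limit + 1):
--         line = ' '.join('*' for _ in range(i))
--         result.append(line)
--
--
--     for i in range(limit, 0, -1):
--         line = ' '.join('*' for _ in range(i))
--         result.append(line)
--
--     return '\n'.join(result)
-- ===== SOURCE B (Python) =====
-- def asterisk_pyramid(limit) -> str:
--     lines = []
--     for k in range(2 * limit):
--         lines.append('* ' * min(k, 2 * limit - 1 - k) + '*')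
--     return '\n'.join(lines)
-- ===== Notes on version B (the rewrite author's own statement) =====
-- stated objective: alternative
-- what changed: B replaces A's two generating loops (ascending then descending, each line built by ' '.join of a generator) with a single loop over all 2*limit rows whose width is computed in closed form as min(k, 2*limit-1-k)+1 and whose line is built by string repetition '* '*w + '*'.
import Mathlib
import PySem

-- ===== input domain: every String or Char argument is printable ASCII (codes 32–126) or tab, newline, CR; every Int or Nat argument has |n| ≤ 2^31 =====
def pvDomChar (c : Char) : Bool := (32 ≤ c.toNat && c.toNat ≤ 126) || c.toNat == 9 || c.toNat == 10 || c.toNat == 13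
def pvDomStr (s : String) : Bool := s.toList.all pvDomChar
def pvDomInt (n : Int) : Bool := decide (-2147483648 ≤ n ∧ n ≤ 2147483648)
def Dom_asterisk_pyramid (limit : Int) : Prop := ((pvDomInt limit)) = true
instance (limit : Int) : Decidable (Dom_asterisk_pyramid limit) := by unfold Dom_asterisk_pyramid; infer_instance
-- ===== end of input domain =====

-- B replaces A's two generating loops (up then down, each line via ' '.join) by ONE loop over all
-- 2*limit rows, computing each row's width in closed form (min(k, 2*limit-1-k)+1) and building the
-- row by string repetition; objective: alternative decomposition, same output.

-- ===== PORT A =====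
-- loop 1: for i in range(1, limit+1): result.append(' '.join('*' for _ in range(i)))
-- loop 2: for i in range(limit, 0, -1): same line appended
def asterisk_pyramid (limit : Int) : String :=
  let result : List String :=
    (PySem.List.pyRange 1 (limit + 1) 1).foldl
      (fun acc i => acc ++ [PySem.Str.join " " ((PySem.List.pyRange 0 i 1).map (fun _ => "*"))]) []
  let result :=
    (PySem.List.pyRange limit 0 (-1)).foldl
      (fun acc i => acc ++ [PySem.Str.join " " ((PySem.List.pyRange 0 i 1).map (fun _ => "*"))]) result
  PySem.Str.join "\n" result

-- ===== PORT B =====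
-- single loop: for k in range(2*limit): lines.append('* ' * min(k, 2*limit-1-k) + '*')
-- ('* ' * m + '*' is ported on code points: pyRepeat for str*int, list append for str concatenation)
def asterisk_pyramid_alt (limit : Int) : String :=
  let lines : List String :=
    (PySem.List.pyRange 0 (2 * limit) 1).foldl
      (fun acc k =>
        acc ++ [String.ofList (PySem.List.pyRepeat "* ".toList (min k (2 * limit - 1 - k)) ++ "*".toList)]) []
  PySem.Str.join "\n" lines

-- ===== PRECONDITION & SPEC =====
def Spec_asterisk_pyramid (limit : Int) (out : String) : Prop := out = asterisk_pyramid_alt limit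
instance (limit : Int) (out : String) : Decidable (Spec_asterisk_pyramid limit out) := by unfold Spec_asterisk_pyramid; infer_instance

-- ===== CLAIM (what is proved, stated in full; the proofs are below) =====
def Claim_equal_asterisk_pyramid : Prop := ∀ (limit : Int), Dom_asterisk_pyramid limit → Spec_asterisk_pyramid limit (asterisk_pyramid limit)

-- ===== LEMMAS AND PROOFS =====

-- on code points: ' '.join of m+1 stars is "* " repeated m times followed by '*'
theorem chars_join_stars (m : Nat) :
    PySem.Chars.join [' '] (List.replicate (m + 1) ['*'])
      = (List.replicate m ['*', ' ']).flatten ++ ['*'] := by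
  induction m with
  | zero => simp [PySem.Chars.join_singleton]
  | succ m ih =>
    have e : List.replicate (m + 1 + 1) (['*'] : List Char) = ['*'] :: ['*'] :: List.replicate m ['*'] := by
      simp [List.replicate_succ]
    rw [e, PySem.Chars.join_cons_cons, ← List.replicate_succ, ih, List.replicate_succ,
      List.flatten_cons]
    simp

-- ' '.join of m+1 stars is '* ' * m + '*'
theorem join_stars (m : Nat) :
    PySem.Str.join " " (List.replicate (m + 1) "*")
      = String.ofList (PySem.List.pyRepeat "* ".toList (m : Int) ++ "*".toList) := by
  apply String.toList_inj.mp
  rw [PySem.Str.toList_join, List.map_replicate]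
  show PySem.Chars.join [' '] (List.replicate (m + 1) ['*'])
      = (String.ofList (PySem.List.pyRepeat ['*', ' '] (m : Int) ++ ['*'])).toList
  rw [chars_join_stars m]
  simp [PySem.List.pyRepeat]

-- A's line of width i+1 equals B's closed-form row whenever the computed width w equals i
theorem line_eq (i : Nat) (w : Int) (hw : w = (i : Int)) :
    PySem.Str.join " " ((PySem.List.pyRange 0 ((i : Int) + 1) 1).map (fun _ => "*"))
      = String.ofList (PySem.List.pyRepeat "* ".toList w ++ "*".toList) := by
  subst hw
  rw [List.map_const', PySem.List.length_pyRange_one,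
    show (((i : Int) + 1 - 0).toNat) = i + 1 by omega, join_stars]

-- ===== VERDICT (by name: the statement is the Claim_ definition above) =====
theorem asterisk_pyramid_spec : Claim_equal_asterisk_pyramid := by
  intro limit _
  unfold Spec_asterisk_pyramid asterisk_pyramid asterisk_pyramid_alt
  simp only [PySem.List.foldl_append_singleton_eq_map, List.nil_append,
    PySem.List.pyRange_neg_one_eq_reverse, List.map_reverse, zero_add]
  by_cases h : 0 < limit
  · obtain ⟨n, rfl⟩ : ∃ n : Nat, limit = (n : Int) := ⟨limit.toNat, (Int.toNat_of_nonneg h.le).symm⟩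
    congr 1
    rw [PySem.List.pyRange_one_append 0 (n : Int) (2 * n) (by omega) (by omega), List.map_append]
    congr 1
    · -- ascending half: row k of B (0 ≤ k < n) is A's line for i = k+1
      apply List.ext_getElem
      · simp [PySem.List.length_pyRange_one]
      · intro k hk1 hk2
        simp only [List.length_map, PySem.List.length_pyRange_one] at hk1
        simp only [List.getElem_map, PySem.List.getElem_pyRange_one]
        rw [show (1 + (k : Int)) = (k : Int) + 1 by ring]
        exact line_eq k _ (by omega)
    · -- descending half: row n+k of B is A's line for i = n-k, i.e. the reverse of the ascent
      apply List.ext_getElem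
      · simp [PySem.List.length_pyRange_one]; omega
      · intro k hk1 hk2
        simp only [List.length_reverse, List.length_map, PySem.List.length_pyRange_one] at hk1 hk2
        rw [List.getElem_reverse]
        simp only [List.getElem_map, PySem.List.getElem_pyRange_one, List.length_map,
          PySem.List.length_pyRange_one]
        rw [show ((n : Int) + 1 - 1).toNat = n by omega,
          show (1 + ((n - 1 - k : Nat) : Int)) = ((n - 1 - k : Nat) : Int) + 1 by ring]
        exact line_eq (n - 1 - k) _ (by omega)
  · rw [PySem.List.pyRange_one_eq_nil (show (limit : Int) + 1 ≤ 1 by omega),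
      PySem.List.pyRange_one_eq_nil (show 2 * limit ≤ 0 by omega)]
    simp
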